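-- pv_equiv track=rewrite | github.com/bergeramit/KattisSolutions | 2048/2048_solution.py | swipe_left_row
-- ===== SOURCE A (Python) =====
-- def swipe_left_row(row):
--     swiped_row = [] # [(numebr, collapsed)]
--     for number in row:
--         if number == 0:
--             continue
--
--         # if the current row is not empty
--         if len(swiped_row) != 0:
--             if swiped_row[-1][0] == number:
--                 if not swiped_row[-1][1]:
--                     swiped_row[-1][0] = 2 * number
--                     swiped_row[-1][1] = True
--                     continue
--
--         swiped_row.append([number, False])
--
--     swiped_row = [tup[0] for tup in swiped_row]
--     zeros_to_add = 4 - len(swiped_row)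
--     return swiped_row + ([0] * zeros_to_add)
-- ===== SOURCE B (Python) =====
-- def swipe_left_row(row):
--     tiles = [n for n in row if n != 0]
--     merged = []
--     i = 0
--     while i < len(tiles):
--         if i + 1 < len(tiles) and tiles[i] == tiles[i + 1]:
--             merged.append(2 * tiles[i])
--             i += 2
--         else:
--             merged.append(tiles[i])
--             i += 1
--     return merged + [0] * (4 - len(merged))
-- ===== Notes on version B (the rewrite author's own statement) =====
-- stated objective: idiomatic
-- what changed: Replaces the single pass with a per-tile 'collapsed' flag on a list of mutable [value,flag] cells by two phases: compact the nonzero tiles, then merge adjacent equal pairs with an index look-ahead, so no flag state is needed.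
import Mathlib
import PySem

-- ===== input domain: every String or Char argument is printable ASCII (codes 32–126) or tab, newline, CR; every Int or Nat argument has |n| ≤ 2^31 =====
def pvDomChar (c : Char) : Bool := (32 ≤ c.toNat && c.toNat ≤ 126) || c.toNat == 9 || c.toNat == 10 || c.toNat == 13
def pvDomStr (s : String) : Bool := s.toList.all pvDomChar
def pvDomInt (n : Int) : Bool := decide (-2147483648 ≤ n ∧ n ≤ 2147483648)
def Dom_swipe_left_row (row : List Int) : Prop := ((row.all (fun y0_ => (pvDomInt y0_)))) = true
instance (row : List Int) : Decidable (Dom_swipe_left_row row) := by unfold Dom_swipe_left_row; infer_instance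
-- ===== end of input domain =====

-- B replaces A's per-tile 'collapsed' flag with a compact-then-merge-pairs decomposition (same cost, plainer).


-- ===== PORT A =====
-- loop body of A: state = list of (value, collapsed) cells; mutation of the
-- last cell is modeled as dropLast ++ [new last cell]
def swipeStepA (s : List (Int × Bool)) (number : Int) : List (Int × Bool) :=
  if number = 0 then s
  else
    match s.getLast? with
    | some last =>
        if last.1 = number ∧ ¬ last.2 then
          s.dropLast ++ [(2 * number, true)]
        else
          s ++ [(number, false)]
    | none => s ++ [(number, false)]

-- zeros_to_add may be negative in Python ([0]*negative = []); Nat truncated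
-- subtraction in List.replicate gives exactly that empty padding
def swipe_left_row (row : List Int) : List Int :=
  let swiped := row.foldl swipeStepA []
  let vals := swiped.map Prod.fst
  vals ++ List.replicate (4 - vals.length) 0

-- ===== PORT B =====
-- index walk of Source B over the compacted tiles, as structural recursion
def mergePairs : List Int → List Int
  | [] => []
  | [x] => [x]
  | x :: y :: rest =>
      if x = y then 2 * x :: mergePairs rest
      else x :: mergePairs (y :: rest)

def swipe_left_row_alt (row : List Int) : List Int :=
  let tiles := row.filter (fun n => n ≠ 0)
  let merged := mergePairs tiles
  merged ++ List.replicate (4 - merged.length) 0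

-- ===== PRECONDITION & SPEC =====
def Spec_swipe_left_row (row : List Int) (out : List Int) : Prop := out = swipe_left_row_alt row
instance (row : List Int) (out : List Int) : Decidable (Spec_swipe_left_row row out) := by unfold Spec_swipe_left_row; infer_instance

-- ===== CLAIM (what is proved, stated in full; the proofs are below) =====
def Claim_equal_swipe_left_row : Prop := ∀ (row : List Int), Dom_swipe_left_row row → Spec_swipe_left_row row (swipe_left_row row)

-- ===== LEMMAS AND PROOFS =====

-- zeros are skipped: folding over row equals folding over its nonzero filter
theorem foldA_filter (row : List Int) (s : List (Int × Bool)) :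
    row.foldl swipeStepA s = (row.filter (fun n => n ≠ 0)).foldl swipeStepA s := by
  induction row generalizing s with
  | nil => rfl
  | cons h t ih =>
      by_cases h0 : h = 0
      · subst h0
        simp [List.foldl, swipeStepA, ih]
      · simp [List.foldl, List.filter, h0, ih]

-- frame lemma: the loop body only inspects the last cell, so a prefix is inert
theorem foldA_frame (t : List Int) (s : List (Int × Bool)) (p : Int × Bool) :
    t.foldl swipeStepA (s ++ [p]) = s ++ t.foldl swipeStepA [p] := by
  induction t generalizing s p with
  | nil => rfl
  | cons h t ih =>
      by_cases h0 : h = 0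
      · subst h0; simp only [List.foldl, swipeStepA]; exact ih s p
      · simp only [List.foldl]
        by_cases hm : p.1 = h ∧ ¬ p.2
        · have hl : swipeStepA (s ++ [p]) h = s ++ [(2 * h, true)] := by
            simp [swipeStepA, h0, hm]
          have hr : swipeStepA [p] h = [(2 * h, true)] := by
            simp [swipeStepA, h0, hm]
          rw [hl, hr]; exact ih s (2 * h, true)
        · have hl : swipeStepA (s ++ [p]) h = (s ++ [p]) ++ [(h, false)] := by
            simp only [swipeStepA, if_neg h0, List.getLast?_append, List.getLast?_singleton,
              Option.some_or]
            rw [if_neg hm]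
          have hr : swipeStepA [p] h = [p] ++ [(h, false)] := by
            simp only [swipeStepA, if_neg h0, List.getLast?_singleton]
            rw [if_neg hm]
          rw [hl, hr]
          rw [List.append_assoc] at hl ⊢
          calc t.foldl swipeStepA (s ++ ([p] ++ [(h, false)]))
              = t.foldl swipeStepA ((s ++ [p]) ++ [(h, false)]) := by rw [List.append_assoc]
            _ = (s ++ [p]) ++ t.foldl swipeStepA [(h, false)] := ih (s ++ [p]) (h, false)
            _ = s ++ ([p] ++ t.foldl swipeStepA [(h, false)]) := by rw [List.append_assoc]
            _ = s ++ t.foldl swipeStepA ([p] ++ [(h, false)]) := by rw [ih [p] (h, false)]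

-- a collapsed last cell never merges again: it splits off entirely
theorem foldA_true (t : List Int) (x : Int) :
    t.foldl swipeStepA [(x, true)] = (x, true) :: t.foldl swipeStepA [] := by
  induction t with
  | nil => rfl
  | cons h t ih =>
      by_cases h0 : h = 0
      · subst h0; simp only [List.foldl, swipeStepA]; exact ih
      · simp only [List.foldl]
        have hl : swipeStepA [(x, true)] h = [(x, true)] ++ [(h, false)] := by
          simp [swipeStepA, h0]
        have hr : swipeStepA ([] : List (Int × Bool)) h = [(h, false)] := by
          simp [swipeStepA, h0]
        rw [hl, hr, foldA_frame t [(x, true)] (h, false)]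
        rfl

-- main invariant: on a zero-free list, A's loop started at a fresh cell (a,false)
-- computes exactly mergePairs (a :: l)
theorem foldA_merge :
    ∀ n l, l.length ≤ n → (∀ x ∈ l, x ≠ (0 : Int)) → ∀ a : Int,
      (l.foldl swipeStepA [(a, false)]).map Prod.fst = mergePairs (a :: l) := by
  intro n
  induction n with
  | zero =>
      intro l hl _ a
      have : l = [] := List.eq_nil_of_length_eq_zero (Nat.le_zero.mp hl)
      subst this; rfl
  | succ n ih =>
      intro l hl hz a
      cases l with
      | nil => rfl
      | cons h t =>
          have h0 : h ≠ 0 := hz h (List.mem_cons_self ..)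
          have hzt : ∀ x ∈ t, x ≠ (0 : Int) := fun x hx => hz x (List.mem_cons_of_mem _ hx)
          by_cases hah : a = h
          · subst hah
            have hstep : swipeStepA [(a, false)] a = [(2 * a, true)] := by
              simp [swipeStepA, h0]
            simp only [List.foldl, hstep, foldA_true, List.map_cons, mergePairs]
            congr 1
            cases t with
            | nil => rfl
            | cons b t' =>
                have hb : b ≠ 0 := hzt b (List.mem_cons_self ..)
                have hstep2 : swipeStepA ([] : List (Int × Bool)) b = [(b, false)] := by
                  simp [swipeStepA, hb]
                simp only [List.foldl, hstep2]
                exact ih t' (by simp at hl ⊢; omega)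
                  (fun x hx => hzt x (List.mem_cons_of_mem _ hx)) b
          · have hstep : swipeStepA [(a, false)] h = [(a, false)] ++ [(h, false)] := by
              simp [swipeStepA, h0, hah]
            simp only [List.foldl, hstep, foldA_frame t [(a, false)] (h, false),
              List.map_append, List.map_cons, List.map_nil]
            rw [ih t (by simp at hl ⊢; omega) hzt h]
            simp [mergePairs, hah]

theorem swipe_eq (row : List Int) : swipe_left_row row = swipe_left_row_alt row := by
  unfold swipe_left_row swipe_left_row_alt
  have key : (row.foldl swipeStepA []).map Prod.fst
      = mergePairs (row.filter (fun n => n ≠ 0)) := by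
    rw [foldA_filter row []]
    generalize hf : row.filter (fun n => n ≠ 0) = l
    have hz : ∀ x ∈ l, x ≠ (0 : Int) := by
      intro x hx; rw [← hf] at hx
      have := (List.mem_filter.mp hx).2
      exact of_decide_eq_true this
    cases l with
    | nil => rfl
    | cons h t =>
        have h0 : h ≠ 0 := hz h (List.mem_cons_self ..)
        have hstep : swipeStepA ([] : List (Int × Bool)) h = [(h, false)] := by
          simp [swipeStepA, h0]
        simp only [List.foldl, hstep]
        exact foldA_merge t.length t (le_refl _)
          (fun x hx => hz x (List.mem_cons_of_mem _ hx)) h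
  simp only [key]

-- ===== VERDICT (by name: the statement is the Claim_ definition above) =====
theorem swipe_left_row_spec : Claim_equal_swipe_left_row := by
  intro row _
  unfold Spec_swipe_left_row
  exact swipe_eq row
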